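-- pv_equiv track=rewrite | github.com/riscv/riscv-arch-test | generators/ctp/transpose_csv.py | split_columns_with_blanks
-- ===== SOURCE A (Python) =====
-- def is_blank_column(col: list[str]) -> bool:
--     return all(cell.strip() == "" for cell in col)
--
-- def is_blank_row_excluding_first(row: list[str]) -> bool:
--     return all(cell.strip() == "" for cell in row[1:])
--
-- def split_columns_with_blanks(transposed: list[list[str]], max_columns: int) -> list[list[list[str]]]:
--     if not transposed:
--         return []
--
--     first_col = [row[0] for row in transposed]
--     total_cols = len(transposed[0])
--
--     chunks: list[list[list[str]]] = []
--     start_col = 1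
--
--     while start_col < total_cols:
--         end_col = start_col
--         col_count = 1  # count first col
--
--         while end_col < total_cols and col_count < max_columns:
--             current_col = [row[end_col] for row in transposed]
--             if is_blank_column(current_col):
--                 break
--             end_col += 1
--             col_count += 1
--
--         chunk = []
--         for i, row in enumerate(transposed):
--             new_row = [first_col[i], *row[start_col:end_col]]
--             if not is_blank_row_excluding_first(new_row):
--                 chunk.append(new_row)
--
--         chunks.append(chunk)
--
--         if end_col < total_cols and is_blank_column([row[end_col] for row in transposed]):
--             start_col = end_col + 1
--         else:
--             start_col = end_col
--
--     return chunks
-- ===== SOURCE B (Python) =====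
-- def is_blank_row_excluding_first(row):
--     return all(cell.strip() == "" for cell in row[1:])
--
-- def split_columns_with_blanks(transposed, max_columns):
--     if not transposed:
--         return []
--
--     first_col = [row[0] for row in transposed]
--     total_cols = len(transposed[0])
--
--     chunks = []
--
--     def flush(cur):
--         # cur is the list of COLUMNS of the current chunk (column-wise accumulation);
--         # transpose it back into rows, prefix first_col, drop blank rows
--         chunk = []
--         for i, f in enumerate(first_col):
--             new_row = [f] + [c[i] for c in cur]
--             if not is_blank_row_excluding_first(new_row):
--                 chunk.append(new_row)
--         chunks.append(chunk)
--
--     cur = []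
--     for j in range(1, total_cols):
--         col = [row[j] for row in transposed]
--         if all(cell.strip() == "" for cell in col):
--             flush(cur)
--             cur = []
--         elif len(cur) >= max_columns - 1:
--             flush(cur)
--             cur = [col]
--         else:
--             cur.append(col)
--     if cur:
--         flush(cur)
--     return chunks
-- ===== Notes on version B (the rewrite author's own statement) =====
-- stated objective: alternative
-- what changed: B replaces A's nested while-loops over start/end column pointers and row-slice chunk building with a single left fold over the columns that accumulates the current chunk column-wise (as a list of column cell-lists) and flushes it - transposing the accumulated columns back into rows, prefixing the first column and dropping blank rows - whenever a blank column or the width cap is hit, plus one trailing flush for a pending chunk.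
import Mathlib
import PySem

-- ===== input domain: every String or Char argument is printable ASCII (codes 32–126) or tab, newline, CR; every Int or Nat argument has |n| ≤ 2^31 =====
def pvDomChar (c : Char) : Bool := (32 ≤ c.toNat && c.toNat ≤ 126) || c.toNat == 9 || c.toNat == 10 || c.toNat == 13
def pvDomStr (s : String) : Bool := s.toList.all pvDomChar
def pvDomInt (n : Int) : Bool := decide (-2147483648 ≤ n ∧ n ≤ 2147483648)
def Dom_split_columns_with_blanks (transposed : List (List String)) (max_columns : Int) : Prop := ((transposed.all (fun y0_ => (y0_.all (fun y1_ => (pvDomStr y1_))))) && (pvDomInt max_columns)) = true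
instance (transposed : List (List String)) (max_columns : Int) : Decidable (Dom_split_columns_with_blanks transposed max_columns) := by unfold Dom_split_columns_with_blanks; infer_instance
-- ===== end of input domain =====

-- B replaces A's pointer-scanning while-loops and row-slice chunk building with a single left
-- fold over the columns that accumulates the current chunk column-wise and flushes it
-- (transposing back into rows, dropping blank ones) on a blank column or the width cap;
-- objective: alternative algorithm of the same cost.

-- ===== PORT A =====
def pvStripBlank (cell : String) : Bool := PySem.Str.strip cell == ""

def pvIsBlankColumn (col : List String) : Bool := col.all pvStripBlank

def pvIsBlankRowExcludingFirst (row : List String) : Bool :=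
  (PySem.List.slice row (some 1) none).all pvStripBlank

-- [row[j] for row in transposed]  (in-range under Pre_, so the "" default is never used)
def pvColA (transposed : List (List String)) (j : Int) : List String :=
  transposed.map (fun row => PySem.List.pyGetD row j "")

-- A's inner while loop: fueled; under Pre_ the fuel (total_cols) is never exhausted
def pvInnerA (t : List (List String)) (total max_columns : Int) :
    Nat → Int → Int → Int
  | 0, e, _ => e
  | fuel+1, e, c =>
    if e < total ∧ c < max_columns then
      if pvIsBlankColumn (pvColA t e) then e
      else pvInnerA t total max_columns fuel (e+1) (c+1)
    else e

-- A's chunk-building for loop over enumerate(transposed)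
def pvChunkA (t : List (List String)) (first_col : List String) (s e : Int) :
    List (List String) :=
  (PySem.List.enumerate t 0).foldl (fun acc p =>
    let new_row := PySem.List.pyGetD first_col p.1 "" :: PySem.List.slice p.2 (some s) (some e)
    if pvIsBlankRowExcludingFirst new_row then acc else acc ++ [new_row]) []

-- A's outer while loop: fueled; under Pre_ start_col strictly increases, so fuel total_cols suffices
def pvOuterA (t : List (List String)) (first_col : List String) (total max_columns : Int) :
    Nat → Int → List (List (List String)) → List (List (List String))
  | 0, _, chunks => chunks
  | fuel+1, start, chunks =>
    if start < total then
      let e := pvInnerA t total max_columns total.toNat start 1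
      let chunks' := chunks ++ [pvChunkA t first_col start e]
      let start' := if e < total ∧ pvIsBlankColumn (pvColA t e) then e + 1 else e
      pvOuterA t first_col total max_columns fuel start' chunks'
    else chunks

def split_columns_with_blanks (transposed : List (List String)) (max_columns : Int) :
    List (List (List String)) :=
  if transposed.isEmpty then []
  else
    let first_col := transposed.map (fun row => PySem.List.pyGetD row 0 "")
    let total : Int := ((transposed.headD []).length : Int)
    pvOuterA transposed first_col total max_columns total.toNat 1 []

-- ===== PORT B =====
def pvStripBlankB (cell : String) : Bool := PySem.Str.strip cell == ""

def pvIsBlankRowExcludingFirstB (row : List String) : Bool :=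
  (PySem.List.slice row (some 1) none).all pvStripBlankB

-- [row[j] for row in transposed]
def pvColB (transposed : List (List String)) (j : Int) : List String :=
  transposed.map (fun row => PySem.List.pyGetD row j "")

-- B's flush: transpose the accumulated chunk columns back into rows, prefix first_col,
-- keep rows that are not blank excluding the first cell
def pvFlushB (first_col : List String) (cur : List (List String)) : List (List String) :=
  (PySem.List.enumerate first_col 0).foldl (fun chunk p =>
    let new_row := p.2 :: cur.map (fun c => PySem.List.pyGetD c p.1 "")
    if pvIsBlankRowExcludingFirstB new_row then chunk else chunk ++ [new_row]) []

-- B's fold step over one column index j: blank column flushes and resets, a full-width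
-- chunk flushes and restarts with this column, otherwise the column joins the chunk
def pvStepB (t : List (List String)) (max_columns : Int) (first_col : List String)
    (st : List (List String) × List (List (List String))) (j : Int) :
    List (List String) × List (List (List String)) :=
  let col := pvColB t j
  if col.all pvStripBlankB then ([], st.2 ++ [pvFlushB first_col st.1])
  else if max_columns - 1 ≤ (st.1.length : Int) then ([col], st.2 ++ [pvFlushB first_col st.1])
  else (st.1 ++ [col], st.2)

-- Source B's trailing 'if cur: flush(cur)'
def pvFinishB (first_col : List String) (st : List (List String) × List (List (List String))) :
    List (List (List String)) :=
  if st.1.isEmpty then st.2 else st.2 ++ [pvFlushB first_col st.1]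

def split_columns_with_blanks_alt (transposed : List (List String)) (max_columns : Int) :
    List (List (List String)) :=
  if transposed.isEmpty then []
  else
    let first_col := transposed.map (fun row => PySem.List.pyGetD row 0 "")
    let total : Int := ((transposed.headD []).length : Int)
    pvFinishB first_col
      ((PySem.List.pyRange 1 total 1).foldl (pvStepB transposed max_columns first_col) ([], []))

-- ===== PRECONDITION & SPEC =====
-- Pre_ excludes exactly the inputs where Python A does not return: a first row of length 0 or a
-- row shorter than the first row (IndexError on row[0] / row[end_col]), and max_columns ≤ 1 with
-- some non-blank column after the first (the outer while loop then never advances: divergence).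
def Pre_split_columns_with_blanks (transposed : List (List String)) (max_columns : Int) : Prop :=
  transposed = [] ∨
    (0 < (transposed.headD []).length ∧
      (∀ row ∈ transposed, (transposed.headD []).length ≤ row.length) ∧
      (2 ≤ max_columns ∨
        ∀ j ∈ PySem.List.pyRange 1 ((transposed.headD []).length : Int) 1,
          ∀ row ∈ transposed, PySem.Str.strip (PySem.List.pyGetD row j "") = ""))
instance (transposed : List (List String)) (max_columns : Int) :
    Decidable (Pre_split_columns_with_blanks transposed max_columns) := by
  unfold Pre_split_columns_with_blanks; infer_instance

def pvWitness_split_columns_with_blanks : List (List String) × Int :=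
  ([["a", "b", "", "c"], ["d", "e", " ", "f"]], 3)

def Spec_split_columns_with_blanks (transposed : List (List String)) (max_columns : Int) (out : List (List (List String))) : Prop := out = split_columns_with_blanks_alt transposed max_columns
instance (transposed : List (List String)) (max_columns : Int) (out : List (List (List String))) : Decidable (Spec_split_columns_with_blanks transposed max_columns out) := by unfold Spec_split_columns_with_blanks; infer_instance

-- ===== CLAIM (what is proved, stated in full; the proofs are below) =====
def Claim_equal_split_columns_with_blanks : Prop := ∀ (transposed : List (List String)) (max_columns : Int), Dom_split_columns_with_blanks transposed max_columns → Pre_split_columns_with_blanks transposed max_columns → Spec_split_columns_with_blanks transposed max_columns (split_columns_with_blanks transposed max_columns)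

-- ===== LEMMAS AND PROOFS =====

theorem pv_witness_ok :
    Dom_split_columns_with_blanks pvWitness_split_columns_with_blanks.1 pvWitness_split_columns_with_blanks.2 ∧
    Pre_split_columns_with_blanks pvWitness_split_columns_with_blanks.1 pvWitness_split_columns_with_blanks.2 := by
  decide

-- A's inner while loop is fuel-irrelevant beyond total - e steps
theorem pv_innerA_fuel (t : List (List String)) (total max_columns : Int) :
    ∀ (f1 : Nat) (f2 : Nat) (e c : Int), (total - e).toNat ≤ f1 → (total - e).toNat ≤ f2 →
      pvInnerA t total max_columns f1 e c = pvInnerA t total max_columns f2 e c := by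
  intro f1
  induction f1 with
  | zero =>
    intro f2 e c h1 h2
    have he : ¬ e < total := by omega
    cases f2 with
    | zero => rfl
    | succ g => simp [pvInnerA, he]
  | succ f ih =>
    intro f2 e c h1 h2
    cases f2 with
    | zero =>
      have he : ¬ e < total := by omega
      simp [pvInnerA, he]
    | succ g =>
      simp only [pvInnerA]
      by_cases hc : e < total ∧ c < max_columns
      · rw [if_pos hc, if_pos hc]
        by_cases hb : pvIsBlankColumn (pvColA t e) = true
        · rw [if_pos hb, if_pos hb]
        · rw [if_neg hb, if_neg hb]
          exact ih g (e+1) (c+1) (by omega) (by omega)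
      · rw [if_neg hc, if_neg hc]

-- consuming n non-blank, under-cap columns advances A's inner pointer and counter by n
theorem pv_innerA_shift (t : List (List String)) (total max_columns : Int) :
    ∀ (n : Nat) (s c : Int), 0 ≤ s → s + n ≤ total →
      (∀ j : Int, s ≤ j → j < s + n → ¬ (pvIsBlankColumn (pvColA t j) = true)) →
      (c + n ≤ max_columns ∨ n = 0) →
      pvInnerA t total max_columns total.toNat s c =
        pvInnerA t total max_columns total.toNat (s + n) (c + n) := by
  intro n
  induction n with
  | zero => intro s c _ _ _ _; simp
  | succ n ih =>
    intro s c h0 hn hnb hcap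
    have hst : s < total := by push_cast at hn ⊢; omega
    have hcm : c < max_columns := by
      rcases hcap with h | h
      · push_cast at h; omega
      · omega
    have hnbs : ¬ (pvIsBlankColumn (pvColA t s) = true) := hnb s le_rfl (by push_cast; omega)
    have hfu : (total - s).toNat ≤ total.toNat := by omega
    rw [pv_innerA_fuel t total max_columns total.toNat (total - s).toNat s c hfu le_rfl]
    have hts : (total - s).toNat = (total - (s+1)).toNat + 1 := by omega
    rw [hts]
    simp only [pvInnerA]
    rw [if_pos ⟨hst, hcm⟩, if_neg hnbs]
    rw [pv_innerA_fuel t total max_columns ((total - (s+1)).toNat) total.toNat (s+1) (c+1) le_rfl (by omega)]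
    have := ih (s+1) (c+1) (by omega) (by push_cast at hn ⊢; omega)
      (fun j hj1 hj2 => hnb j (by omega) (by push_cast at hj2 ⊢; omega))
      (by rcases hcap with h | h
          · left; push_cast at h ⊢; omega
          · simp at h)
    rw [this]
    congr 1 <;> push_cast <;> ring

-- A's inner loop stops at once at the end, at the cap, or on a blank column
theorem pv_innerA_stop (t : List (List String)) (total max_columns : Int) (s0 c : Int)
    (h : ¬ (s0 < total) ∨ ¬ (c < max_columns) ∨ pvIsBlankColumn (pvColA t s0) = true) :
    pvInnerA t total max_columns total.toNat s0 c = s0 := by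
  cases hf : total.toNat with
  | zero => rfl
  | succ k =>
    simp only [pvInnerA]
    by_cases hc : s0 < total ∧ c < max_columns
    · rw [if_pos hc]
      rcases h with h | h | h
      · exact absurd hc.1 h
      · exact absurd hc.2 h
      · rw [if_pos h]
    · rw [if_neg hc]

-- A's inner while loop never moves the end pointer left
theorem pv_innerA_ge (t : List (List String)) (total max_columns : Int) :
    ∀ (fuel : Nat) (e c : Int), e ≤ pvInnerA t total max_columns fuel e c := by
  intro fuel
  induction fuel with
  | zero => intro e c; exact le_rfl
  | succ f ih =>
    intro e c
    simp only [pvInnerA]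
    split
    · split
      · exact le_rfl
      · exact le_trans (by omega) (ih (e+1) (c+1))
    · exact le_rfl

-- A's outer while loop makes progress under Pre_
theorem pv_outerA_progress (t : List (List String)) (total max_columns : Int) (s : Int)
    (hmax : 2 ≤ max_columns ∨ ∀ j : Int, 1 ≤ j → j < total → pvIsBlankColumn (pvColA t j) = true)
    (hs : 1 ≤ s) (hst : s < total) :
    s < (if pvInnerA t total max_columns total.toNat s 1 < total ∧
            pvIsBlankColumn (pvColA t (pvInnerA t total max_columns total.toNat s 1)) = true
         then pvInnerA t total max_columns total.toNat s 1 + 1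
         else pvInnerA t total max_columns total.toNat s 1) := by
  have hge : s ≤ pvInnerA t total max_columns total.toNat s 1 :=
    pv_innerA_ge t total max_columns total.toNat s 1
  by_cases hb : pvInnerA t total max_columns total.toNat s 1 < total ∧
      pvIsBlankColumn (pvColA t (pvInnerA t total max_columns total.toNat s 1)) = true
  · rw [if_pos hb]; omega
  · rw [if_neg hb]
    rcases eq_or_lt_of_le hge with heq | hlt
    · exfalso
      have h1 : total.toNat = (total.toNat - 1) + 1 := by omega
      have hunf : pvInnerA t total max_columns total.toNat s 1 =
          if s < total ∧ 1 < max_columns then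
            (if pvIsBlankColumn (pvColA t s) = true then s
             else pvInnerA t total max_columns (total.toNat - 1) (s+1) 2)
          else s := by
        conv_lhs => rw [h1]
        simp only [pvInnerA]
        norm_num
      by_cases hm : (1:Int) < max_columns
      · by_cases hbs : pvIsBlankColumn (pvColA t s) = true
        · have he : pvInnerA t total max_columns total.toNat s 1 = s := by
            rw [hunf, if_pos ⟨hst, hm⟩, if_pos hbs]
          exact hb ⟨by omega, by rw [he]; exact hbs⟩
        · rw [hunf, if_pos ⟨hst, hm⟩, if_neg hbs] at heq
          have := pv_innerA_ge t total max_columns (total.toNat - 1) (s+1) 2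
          omega
      · have hbs : pvIsBlankColumn (pvColA t s) = true := by
          rcases hmax with h2 | hall
          · omega
          · exact hall s hs hst
        have he : pvInnerA t total max_columns total.toNat s 1 = s := by
          rw [hunf, if_neg (by tauto)]
        exact hb ⟨by omega, by rw [he]; exact hbs⟩
    · omega

-- A's outer while loop is fuel-irrelevant beyond total - s + 1 steps
theorem pv_outerA_fuel (t : List (List String)) (fc : List String) (total max_columns : Int)
    (hmax : 2 ≤ max_columns ∨ ∀ j : Int, 1 ≤ j → j < total → pvIsBlankColumn (pvColA t j) = true) :
    ∀ (f1 : Nat) (f2 : Nat) (s : Int) (chunks : List (List (List String))), 1 ≤ s →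
      (total - s).toNat < f1 → (total - s).toNat < f2 →
      pvOuterA t fc total max_columns f1 s chunks = pvOuterA t fc total max_columns f2 s chunks := by
  intro f1
  induction f1 with
  | zero => intro f2 s chunks _ h1 _; omega
  | succ f ih =>
    intro f2 s chunks hs h1 h2
    cases f2 with
    | zero => omega
    | succ g =>
      simp only [pvOuterA]
      by_cases hst : s < total
      · rw [if_pos hst, if_pos hst]
        have hp := pv_outerA_progress t total max_columns s hmax hs hst
        exact ih g _ _ (by omega) (by omega) (by omega)
      · rw [if_neg hst, if_neg hst]

-- general shape: a filtered append-fold is map-then-filter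
theorem pv_fold_filter {α β : Type} (blank : β → Bool) (f : α → β) (l : List α) :
    l.foldl (fun acc p => let nr := f p; if blank nr then acc else acc ++ [nr]) [] =
      ((l.map f).filter (fun r => ! blank r)) := by
  show l.foldl (fun acc p => if blank (f p) then acc else acc ++ [f p]) [] =
      ((l.map f).filter (fun r => ! blank r))
  rw [List.filter_map]
  have h := PySem.List.foldl_append_if (fun x => ! blank (f x)) f l []
  simp only [List.nil_append] at h
  rw [show ((fun r => ! blank r) ∘ f) = (fun x => ! blank (f x)) from rfl, ← h]
  congr 1
  funext acc x
  by_cases hb : blank (f x) = true <;> simp [hb]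

-- enumerate over a mapped list
theorem pv_enumerate_map {α β : Type} (g : α → β) :
    ∀ (l : List α) (k : Int),
      PySem.List.enumerate (l.map g) k = (PySem.List.enumerate l k).map (fun p => (p.1, g p.2)) := by
  intro l
  induction l with
  | nil => intro k; rfl
  | cons x xs ih =>
    intro k
    simp only [List.map_cons, PySem.List.enumerate_cons, ih (k+1)]

-- a Python slice row[s:e] is the gather [row[j] for j in range(s, e)]
theorem pv_slice_as_map (row : List String) :
    ∀ (n : Nat) (s : Int), 0 ≤ s → s + n ≤ (row.length : Int) →
      PySem.List.slice row (some s) (some (s + n)) =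
        (PySem.List.pyRange s (s + n) 1).map (fun j => PySem.List.pyGetD row j "") := by
  intro n
  induction n with
  | zero =>
    intro s h0 hn
    rw [PySem.List.pyRange_one_eq_nil (by omega)]
    rw [PySem.List.slice_toNat row h0 (by omega)]
    simp
  | succ n ih =>
    intro s h0 hn
    push_cast at hn ⊢
    have hs : s < (row.length : Int) := by omega
    have hsn : s.toNat < row.length := by omega
    rw [PySem.List.pyRange_one_cons (by omega)]
    rw [PySem.List.slice_toNat row h0 (by omega)]
    rw [List.drop_eq_getElem_cons hsn]
    have htk : (s + ((n:Int) + 1)).toNat - s.toNat = n + 1 := by omega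
    rw [htk, List.take_succ_cons, List.map_cons]
    congr 1
    · rw [PySem.List.pyGetD_eq_getElem row "" h0 hs]
    · have hih := ih (s+1) (by omega) (by omega)
      have he : s + ((n:Int)+1) = s + 1 + n := by ring
      rw [he, ← hih]
      have ha : (0:Int) ≤ s + 1 := by omega
      have hb : (0:Int) ≤ s + 1 + n := by omega
      rw [PySem.List.slice_toNat row ha hb]
      have h1 : (s + 1 + (n:Int)).toNat - (s+1).toNat = n := by omega
      have h2 : (s+1).toNat = s.toNat + 1 := by omega
      rw [h1, h2]

-- B's flush of the columns s..e-1 is A's chunk of the range [s, e)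
theorem pv_flush_eq (t : List (List String)) (fc : List String) (total : Int)
    (hfc : fc = t.map (fun row => PySem.List.pyGetD row 0 ""))
    (hrect : ∀ row ∈ t, total ≤ (row.length : Int))
    (s e : Int) (h0 : 0 ≤ s) (hse : s ≤ e) (het : e ≤ total) :
    pvFlushB fc ((PySem.List.pyRange s e 1).map (pvColB t)) = pvChunkA t fc s e := by
  unfold pvFlushB pvChunkA
  rw [pv_fold_filter pvIsBlankRowExcludingFirstB
        (fun p => p.2 :: ((PySem.List.pyRange s e 1).map (pvColB t)).map
          (fun c => PySem.List.pyGetD c p.1 "")) (PySem.List.enumerate fc 0),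
      pv_fold_filter pvIsBlankRowExcludingFirst
        (fun p => PySem.List.pyGetD fc p.1 "" :: PySem.List.slice p.2 (some s) (some e))
        (PySem.List.enumerate t 0)]
  have hpred : pvIsBlankRowExcludingFirstB = pvIsBlankRowExcludingFirst := rfl
  rw [hpred]
  congr 1
  rw [hfc, pv_enumerate_map, List.map_map]
  apply List.map_congr_left
  intro p hp
  obtain ⟨k, hk, rfl⟩ := (PySem.List.mem_enumerate_iff t 0 p).mp hp
  simp only [Function.comp_apply, zero_add]
  congr 1
  · rw [PySem.List.pyGetD_eq_getElem (t.map (fun row => PySem.List.pyGetD row 0 "")) ""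
        (by exact_mod_cast k.zero_le) (by simp; exact_mod_cast hk)]
    simp
  · rw [List.map_map]
    have hlen : e ≤ (t[k].length : Int) := le_trans het (hrect _ (List.getElem_mem hk))
    have hn : e = s + ((e - s).toNat : Int) := by omega
    rw [hn, pv_slice_as_map t[k] (e-s).toNat s h0 (by omega)]
    apply List.map_congr_left
    intro j hj
    simp only [Function.comp_apply, pvColB]
    rw [PySem.List.pyGetD_eq_getElem (t.map (fun row => PySem.List.pyGetD row j "")) ""
        (by exact_mod_cast k.zero_le) (by simp; exact_mod_cast hk)]
    simp

-- one unfolding of A's outer loop below total, zeta-reduced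
theorem pv_outerA_step (t : List (List String)) (fc : List String) (total max_columns : Int)
    (f : Nat) (s : Int) (chunks : List (List (List String))) (hst : s < total) :
    pvOuterA t fc total max_columns (f+1) s chunks =
      pvOuterA t fc total max_columns f
        (if pvInnerA t total max_columns total.toNat s 1 < total ∧
            pvIsBlankColumn (pvColA t (pvInnerA t total max_columns total.toNat s 1)) = true
         then pvInnerA t total max_columns total.toNat s 1 + 1
         else pvInnerA t total max_columns total.toNat s 1)
        (chunks ++ [pvChunkA t fc s (pvInnerA t total max_columns total.toNat s 1)]) := by
  simp only [pvOuterA]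
  rw [if_pos hst]

-- A's outer loop at or past total returns the chunks
theorem pv_outerA_stop (t : List (List String)) (fc : List String) (total max_columns : Int)
    (f : Nat) (s : Int) (chunks : List (List (List String))) (hst : ¬ s < total) :
    pvOuterA t fc total max_columns (f+1) s chunks = chunks := by
  simp only [pvOuterA]
  rw [if_neg hst]

-- main loop correspondence: B's fold from column s0 with the columns s..s0-1 accumulated
-- equals A's outer loop resumed at start s
theorem pv_main (t : List (List String)) (max_columns total : Int) (fc : List String)
    (hfc : fc = t.map (fun row => PySem.List.pyGetD row 0 ""))
    (hrect : ∀ row ∈ t, total ≤ (row.length : Int))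
    (hmax : 2 ≤ max_columns ∨ ∀ j : Int, 1 ≤ j → j < total → pvIsBlankColumn (pvColA t j) = true) :
    ∀ (n : Nat) (s s0 : Int) (chunks : List (List (List String))),
      1 ≤ s → s ≤ s0 → s0 ≤ total → (total - s0).toNat = n →
      (∀ j : Int, s ≤ j → j < s0 → ¬ (pvIsBlankColumn (pvColA t j) = true)) →
      (s0 - s + 1 ≤ max_columns ∨ s0 = s) →
      pvFinishB fc ((PySem.List.pyRange s0 total 1).foldl (pvStepB t max_columns fc)
          ((PySem.List.pyRange s s0 1).map (pvColB t), chunks))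
        = pvOuterA t fc total max_columns ((total - s).toNat + 1) s chunks := by
  have hbridge : ∀ j : Int, ((pvColB t j).all pvStripBlankB) = pvIsBlankColumn (pvColA t j) :=
    fun _ => rfl
  intro n
  induction n with
  | zero =>
    intro s s0 chunks hs hss0 hs0t hn hnb hcap
    have hs0 : s0 = total := by omega
    subst hs0
    rw [PySem.List.pyRange_one_eq_nil le_rfl, List.foldl_nil]
    by_cases hss : s = s0
    · subst hss
      rw [PySem.List.pyRange_one_eq_nil le_rfl, List.map_nil]
      have hf : (s - s).toNat + 1 = 1 := by omega
      rw [hf, pv_outerA_stop t fc s max_columns 0 s chunks (by omega)]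
      simp [pvFinishB]
    · have hlts : s < s0 := by omega
      have hne : ¬ ((PySem.List.pyRange s s0 1).map (pvColB t)).isEmpty = true := by
        simp [List.isEmpty_iff, ← List.length_eq_zero_iff, PySem.List.length_pyRange_one]
        omega
      unfold pvFinishB
      rw [if_neg hne]
      have hsh := pv_innerA_shift t s0 max_columns (s0 - s).toNat s 1 (by omega) (by omega)
          (by intro j hj1 hj2; exact hnb j hj1 (by omega))
          (by left; rcases hcap with h | h <;> omega)
      have h2 : s + ((s0 - s).toNat : Int) = s0 := by omega
      rw [h2] at hsh
      have he : pvInnerA t s0 max_columns s0.toNat s 1 = s0 :=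
        hsh.trans (pv_innerA_stop t s0 max_columns s0 _ (Or.inl (by omega)))
      obtain ⟨m, hm⟩ : ∃ m, (s0 - s).toNat = m + 1 := ⟨(s0 - s).toNat - 1, by omega⟩
      rw [hm, pv_outerA_step t fc s0 max_columns (m+1) s chunks hlts, he,
        if_neg (fun h => absurd h.1 (lt_irrefl s0)),
        pv_outerA_stop t fc s0 max_columns m s0 _ (by omega),
        pv_flush_eq t fc s0 hfc hrect s s0 (by omega) (by omega) le_rfl]
  | succ n ih =>
    intro s s0 chunks hs hss0 hs0t hn hnb hcap
    have hlt : s0 < total := by omega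
    rw [PySem.List.pyRange_one_cons hlt, List.foldl_cons]
    have hlen : ((((PySem.List.pyRange s s0 1).map (pvColB t)).length : Nat) : Int) = s0 - s := by
      simp [PySem.List.length_pyRange_one]
      omega
    by_cases hb : pvIsBlankColumn (pvColA t s0) = true
    · -- blank column: flush and reset
      have hstep : pvStepB t max_columns fc ((PySem.List.pyRange s s0 1).map (pvColB t), chunks) s0
          = ([], chunks ++ [pvFlushB fc ((PySem.List.pyRange s s0 1).map (pvColB t))]) := by
        simp only [pvStepB]
        rw [hbridge s0, if_pos hb]
      rw [hstep]
      have hih := ih (s0+1) (s0+1)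
          (chunks ++ [pvFlushB fc ((PySem.List.pyRange s s0 1).map (pvColB t))])
          (by omega) le_rfl (by omega) (by omega)
          (fun j hj1 hj2 => absurd hj2 (by omega)) (Or.inr rfl)
      rw [PySem.List.pyRange_one_eq_nil le_rfl, List.map_nil] at hih
      rw [hih]
      have hsh := pv_innerA_shift t total max_columns (s0 - s).toNat s 1 (by omega) (by omega)
          (by intro j hj1 hj2; exact hnb j hj1 (by omega))
          (by rcases hcap with h | h; exacts [Or.inl (by omega), Or.inr (by omega)])
      have h2 : s + ((s0 - s).toNat : Int) = s0 := by omega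
      rw [h2] at hsh
      have he : pvInnerA t total max_columns total.toNat s 1 = s0 :=
        hsh.trans (pv_innerA_stop t total max_columns s0 _ (Or.inr (Or.inr hb)))
      rw [pv_outerA_step t fc total max_columns ((total - s).toNat) s chunks (by omega), he,
        if_pos ⟨hlt, hb⟩,
        pv_flush_eq t fc total hfc hrect s s0 (by omega) (by omega) (by omega)]
      exact pv_outerA_fuel t fc total max_columns hmax _ _ (s0+1) _ (by omega) (by omega) (by omega)
    · by_cases hcapc : max_columns - 1 ≤
          ((((PySem.List.pyRange s s0 1).map (pvColB t)).length : Nat) : Int)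
      · -- width cap hit: flush and restart with this column
        have hss : s < s0 := by
          by_contra h
          have hm1 : max_columns ≤ 1 := by rw [hlen] at hcapc; omega
          rcases hmax with h2 | hall
          · omega
          · exact hb (hall s0 (by omega) hlt)
        have hM : s0 - s + 1 = max_columns := by
          rw [hlen] at hcapc
          rcases hcap with h | h
          · omega
          · omega
        have hstep : pvStepB t max_columns fc ((PySem.List.pyRange s s0 1).map (pvColB t), chunks) s0
            = ([pvColB t s0],
               chunks ++ [pvFlushB fc ((PySem.List.pyRange s s0 1).map (pvColB t))]) := by
          simp only [pvStepB]
          rw [hbridge s0, if_neg hb, if_pos hcapc]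
        rw [hstep]
        have hih := ih s0 (s0+1)
            (chunks ++ [pvFlushB fc ((PySem.List.pyRange s s0 1).map (pvColB t))])
            (by omega) (by omega) (by omega) (by omega)
            (by intro j hj1 hj2
                have hj : j = s0 := by omega
                rw [hj]; exact hb)
            (Or.inl (by omega))
        rw [PySem.List.pyRange_one_singleton, List.map_cons, List.map_nil] at hih
        rw [hih]
        have hsh := pv_innerA_shift t total max_columns (s0 - s).toNat s 1 (by omega) (by omega)
            (by intro j hj1 hj2; exact hnb j hj1 (by omega)) (by left; omega)
        have h2 : s + ((s0 - s).toNat : Int) = s0 := by omega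
        rw [h2] at hsh
        have he : pvInnerA t total max_columns total.toNat s 1 = s0 :=
          hsh.trans (pv_innerA_stop t total max_columns s0 _ (Or.inr (Or.inl (by omega))))
        rw [pv_outerA_step t fc total max_columns ((total - s).toNat) s chunks (by omega), he,
          if_neg (fun h => hb h.2),
          pv_flush_eq t fc total hfc hrect s s0 (by omega) (by omega) (by omega)]
        exact pv_outerA_fuel t fc total max_columns hmax _ _ s0 _ (by omega) (by omega) (by omega)
      · -- column joins the current chunk
        have hstep : pvStepB t max_columns fc ((PySem.List.pyRange s s0 1).map (pvColB t), chunks) s0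
            = ((PySem.List.pyRange s s0 1).map (pvColB t) ++ [pvColB t s0], chunks) := by
          simp only [pvStepB]
          rw [hbridge s0, if_neg hb, if_neg hcapc]
        rw [hstep]
        have hcur : (PySem.List.pyRange s s0 1).map (pvColB t) ++ [pvColB t s0]
            = (PySem.List.pyRange s (s0+1) 1).map (pvColB t) := by
          rw [PySem.List.pyRange_one_succ_right (by omega), List.map_append, List.map_cons,
            List.map_nil]
        rw [hcur]
        exact ih s (s0+1) chunks hs (by omega) (by omega) (by omega)
          (by intro j hj1 hj2
              by_cases hj : j < s0
              · exact hnb j hj1 hj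
              · have hj0 : j = s0 := by omega
                rw [hj0]; exact hb)
          (Or.inl (by rw [hlen] at hcapc; omega))

-- ===== VERDICT (by name: the statement is the Claim_ definition above) =====
theorem split_columns_with_blanks_spec : Claim_equal_split_columns_with_blanks := by
  intro t m _ hpre
  unfold Spec_split_columns_with_blanks split_columns_with_blanks split_columns_with_blanks_alt
  by_cases ht : t.isEmpty
  · rw [if_pos ht, if_pos ht]
  · rw [if_neg ht, if_neg ht]
    rcases hpre with h0 | ⟨hlen, hrect0, hmax0⟩
    · exact absurd (by rw [h0]; rfl) ht
    · have htot : (1:Int) ≤ ((t.headD []).length : Int) := by omega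
      have hrect : ∀ row ∈ t, ((t.headD []).length : Int) ≤ (row.length : Int) := by
        intro row hr
        exact_mod_cast hrect0 row hr
      have hmax : 2 ≤ m ∨ ∀ j : Int, 1 ≤ j → j < ((t.headD []).length : Int) →
          pvIsBlankColumn (pvColA t j) = true := by
        rcases hmax0 with h | h
        · exact Or.inl h
        · right
          intro j hj1 hj2
          unfold pvIsBlankColumn pvColA
          simp only [List.all_map, List.all_eq_true, Function.comp_apply]
          intro row hr
          have hcell := h j (by rw [PySem.List.mem_pyRange_one]; exact ⟨hj1, hj2⟩) row hr
          simp [pvStripBlank, hcell]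
      have hmain := pv_main t m ((t.headD []).length : Int)
          (t.map (fun row => PySem.List.pyGetD row 0 "")) rfl hrect hmax
          (((t.headD []).length : Int) - 1).toNat 1 1 [] le_rfl le_rfl htot rfl
          (fun j hj1 hj2 => absurd hj1 (by omega)) (Or.inr rfl)
      rw [PySem.List.pyRange_one_eq_nil le_rfl, List.map_nil] at hmain
      have hfuel : (((t.headD []).length : Int) - 1).toNat + 1
          = ((t.headD []).length : Int).toNat := by omega
      rw [hfuel] at hmain
      exact hmain.symm
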